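-- pv_equiv track=rewrite | github.com/Chunkys0up7/ISLayer | triple-flow-sim/triple_flow_sim/evaluator/symbolic.py | _combine_or
-- ===== SOURCE A (Python) =====
-- from enum import Enum
--
-- class SymbolicVerdict(str, Enum):
--     """Conservative outcome of a producer-vs-consumer symbolic comparison."""
--
--     ALWAYS_SATISFIED = "always_satisfied"
--     NEVER_SATISFIED = "never_satisfied"
--     SOMETIMES_SATISFIED = "sometimes_satisfied"
--     UNDETERMINED = "undetermined"
--
-- def _combine_or(verdicts: list[SymbolicVerdict]) -> SymbolicVerdict:
--     """OR combinator.
--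
--     If any branch is ALWAYS → ALWAYS (OR is satisfied regardless of others).
--     If all branches are NEVER → NEVER.
--     Otherwise SOMETIMES if any branch is SOMETIMES, else UNDETERMINED.
--     """
--     if not verdicts:
--         return SymbolicVerdict.UNDETERMINED
--     if any(v == SymbolicVerdict.ALWAYS_SATISFIED for v in verdicts):
--         return SymbolicVerdict.ALWAYS_SATISFIED
--     if all(v == SymbolicVerdict.NEVER_SATISFIED for v in verdicts):
--         return SymbolicVerdict.NEVER_SATISFIED
--     if any(v == SymbolicVerdict.SOMETIMES_SATISFIED for v in verdicts):
--         return SymbolicVerdict.SOMETIMES_SATISFIED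
--     return SymbolicVerdict.UNDETERMINED
-- ===== SOURCE B (Python) =====
-- from enum import Enum
--
-- class SymbolicVerdict(str, Enum):
--     """Conservative outcome of a producer-vs-consumer symbolic comparison."""
--
--     ALWAYS_SATISFIED = "always_satisfied"
--     NEVER_SATISFIED = "never_satisfied"
--     SOMETIMES_SATISFIED = "sometimes_satisfied"
--     UNDETERMINED = "undetermined"
--
-- def _rank(v):
--     if v == SymbolicVerdict.ALWAYS_SATISFIED:
--         return 3
--     if v == SymbolicVerdict.SOMETIMES_SATISFIED:
--         return 2
--     if v == SymbolicVerdict.NEVER_SATISFIED: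
--         return 0
--     return 1
--
-- def _combine_or(verdicts):
--     r = max((_rank(v) for v in verdicts), default=1)
--     if r == 3:
--         return SymbolicVerdict.ALWAYS_SATISFIED
--     if r == 2:
--         return SymbolicVerdict.SOMETIMES_SATISFIED
--     if r == 0:
--         return SymbolicVerdict.NEVER_SATISFIED
--     return SymbolicVerdict.UNDETERMINED
-- ===== Notes on version B (the rewrite author's own statement) =====
-- stated objective: alternative
-- what changed: Replaces A's four sequential any/all passes by a single pass: each verdict is mapped to a numeric rank (ALWAYS=3, SOMETIMES=2, other=1, NEVER=0), the maximum rank is taken (default 1 for the empty list), and the rank is mapped back to a verdict.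
import Mathlib
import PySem

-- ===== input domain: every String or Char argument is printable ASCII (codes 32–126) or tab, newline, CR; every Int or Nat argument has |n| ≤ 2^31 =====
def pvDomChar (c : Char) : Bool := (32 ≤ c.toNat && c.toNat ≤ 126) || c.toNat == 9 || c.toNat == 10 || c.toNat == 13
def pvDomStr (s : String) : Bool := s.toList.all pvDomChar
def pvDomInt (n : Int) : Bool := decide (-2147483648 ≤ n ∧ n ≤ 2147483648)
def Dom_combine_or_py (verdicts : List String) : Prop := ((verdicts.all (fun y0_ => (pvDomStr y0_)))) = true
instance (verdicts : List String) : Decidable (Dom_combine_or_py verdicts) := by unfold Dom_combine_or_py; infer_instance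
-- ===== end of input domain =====

-- ===== PORT A =====
def combine_or_py (verdicts : List String) : String :=
  if verdicts = [] then "undetermined"
  else if verdicts.any (fun v => v == "always_satisfied") then "always_satisfied"
  else if verdicts.all (fun v => v == "never_satisfied") then "never_satisfied"
  else if verdicts.any (fun v => v == "sometimes_satisfied") then "sometimes_satisfied"
  else "undetermined"

-- ===== PORT B =====
-- B: one pass — map each verdict to a rank, take the maximum (default 1), map back.
def rankV (v : String) : Int :=
  if v == "always_satisfied" then 3
  else if v == "sometimes_satisfied" then 2
  else if v == "never_satisfied" then 0
  else 1

def combine_or_py_alt (verdicts : List String) : String :=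
  let r : Int :=
    match verdicts.map rankV with
    | [] => 1
    | x :: xs => xs.foldl max x
  if r = 3 then "always_satisfied"
  else if r = 2 then "sometimes_satisfied"
  else if r = 0 then "never_satisfied"
  else "undetermined"

-- ===== PRECONDITION & SPEC =====
def Spec_combine_or_py (verdicts : List String) (out : String) : Prop := out = combine_or_py_alt verdicts
instance (verdicts : List String) (out : String) : Decidable (Spec_combine_or_py verdicts out) := by unfold Spec_combine_or_py; infer_instance

-- ===== CLAIM (what is proved, stated in full; the proofs are below) =====
def Claim_equal_combine_or_py : Prop := ∀ (verdicts : List String), Dom_combine_or_py verdicts → Spec_combine_or_py verdicts (combine_or_py verdicts)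

-- ===== LEMMAS AND PROOFS =====

-- ===== VERDICT (by name: the statement is the Claim_ definition above) =====
lemma rankV_nonneg (v : String) : 0 ≤ rankV v := by
  unfold rankV; split_ifs <;> omega

lemma fold_char (xs : List String) : ∀ (r : Int), 0 ≤ r →
    List.foldl max r (xs.map rankV) =
      (if xs.any (fun v => v == "always_satisfied") then max r 3
       else if xs.any (fun v => v == "sometimes_satisfied") then max r 2
       else if xs.any (fun v => !(v == "never_satisfied")) then max r 1
       else r) := by
  induction xs with
  | nil => intro r hr; simp
  | cons y ys ih =>
    intro r hr
    have h0 := rankV_nonneg y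
    have := ih (max r (rankV y)) (by omega)
    simp only [List.map_cons, List.foldl_cons, List.any_cons]
    rw [this]
    unfold rankV
    by_cases h1 : y = "always_satisfied" <;> by_cases h2 : y = "sometimes_satisfied" <;>
      by_cases h3 : y = "never_satisfied" <;>
      simp [h1, h2, h3] <;> split_ifs <;> omega

theorem combine_or_py_spec : Claim_equal_combine_or_py := by
  intro verdicts _
  unfold Spec_combine_or_py combine_or_py combine_or_py_alt
  cases verdicts with
  | nil => simp
  | cons x xs =>
    simp only [List.map_cons]
    simp only [fold_char xs (rankV x) (rankV_nonneg x)]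
    have hall : (x :: xs).all (fun v => v == "never_satisfied")
        = ((x == "never_satisfied") && !(xs.any (fun v => !(v == "never_satisfied")))) := by
      simp [List.all_eq_not_any_not]
    unfold rankV
    by_cases h1 : x = "always_satisfied" <;> by_cases h2 : x = "sometimes_satisfied" <;>
      by_cases h3 : x = "never_satisfied" <;>
      by_cases ha : xs.any (fun v => v == "always_satisfied") <;>
      by_cases hs : xs.any (fun v => v == "sometimes_satisfied") <;>
      by_cases hn : xs.any (fun v => !(v == "never_satisfied")) <;>
      simp_all <;> try (split_ifs <;> simp_all <;> omega)
    all_goals exact absurd (hn _ hs) (by decide)
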